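-- pv_equiv track=rewrite | github.com/Saronzeleke/Certificate-Authenticity-Verification-System | ai-service/app/analyzers/certificate_analyzer.py | _check_suspicious_patterns
-- ===== SOURCE A (Python) =====
-- from typing import Dict, Any, List, Optional, Union
--
-- def _check_suspicious_patterns(fields: Dict[str, str]) -> bool:
--     """Check for suspicious patterns in extracted data"""
--     if not fields:
--         return False
--
--     suspicious_indicators = [
--         'test', 'example', 'sample', 'fake', 'dummy',
--         '@@', '##', '&&', 'XXXX', '00000', '123456'
--     ]
--
--     for field_value in fields.values():
--         if field_value and isinstance(field_value, str):
--             field_lower = field_value.lower()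
--             if any(indicator in field_lower for indicator in suspicious_indicators):
--                 return True
--     return False
-- ===== SOURCE B (Python) =====
-- def _check_suspicious_patterns(fields):
--     """Check for suspicious patterns in extracted data"""
--     if not fields:
--         return False
--
--     suspicious_indicators = [
--         'test', 'example', 'sample', 'fake', 'dummy',
--         '@@', '##', '&&', 'XXXX', '00000', '123456'
--     ]
--
--     # index the patterns by first character, then scan each value once,
--     # position by position, matching only the candidates for that character
--     by_first = {}
--     for ind in suspicious_indicators:
--         by_first.setdefault(ind[0], []).append(ind)
--
--     for field_value in fields.values():
--         if field_value and isinstance(field_value, str):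
--             low = field_value.lower()
--             for i in range(len(low)):
--                 for ind in by_first.get(low[i], []):
--                     if low.startswith(ind, i):
--                         return True
--     return False
-- ===== Notes on version B (the rewrite author's own statement) =====
-- stated objective: alternative
-- what changed: Replaces A's per-indicator library substring search ('indicator in field_lower' for each indicator) with a position-driven multi-pattern scan: the indicators are indexed by first character in a dict built once, then each lowercased value is scanned left to right and at each position only the candidates bucketed under that character are tested with startswith.
import Mathlib
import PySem

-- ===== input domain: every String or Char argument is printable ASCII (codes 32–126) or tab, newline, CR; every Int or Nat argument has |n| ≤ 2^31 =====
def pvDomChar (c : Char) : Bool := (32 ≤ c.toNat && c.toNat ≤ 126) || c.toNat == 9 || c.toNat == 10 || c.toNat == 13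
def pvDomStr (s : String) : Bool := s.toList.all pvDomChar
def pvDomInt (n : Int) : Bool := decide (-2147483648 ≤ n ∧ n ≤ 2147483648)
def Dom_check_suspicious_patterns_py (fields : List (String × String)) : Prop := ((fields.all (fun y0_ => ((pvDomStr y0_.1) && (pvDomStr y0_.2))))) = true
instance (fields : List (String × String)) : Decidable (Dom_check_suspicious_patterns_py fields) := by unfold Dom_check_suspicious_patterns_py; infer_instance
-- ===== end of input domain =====

-- B replaces A's per-indicator library substring search by a position-driven multi-pattern
-- scan: the indicators are indexed by first character once, then each lowercased value is
-- scanned left to right, testing only the bucket for the character at each position.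

-- the shared constant list of suspicious indicators
def pvIndicators : List String :=
  ["test", "example", "sample", "fake", "dummy",
   "@@", "##", "&&", "XXXX", "00000", "123456"]

-- ===== PORT A =====
-- 'for field_value in fields.values(): …' with early return, as structural recursion
def pvALoop : List (String × String) → Bool
  | [] => false
  | (_, v) :: rest =>
    if v ≠ "" then
      if pvIndicators.any (fun ind => PySem.Str.isIn ind (PySem.Str.lower v)) then true
      else pvALoop rest
    else pvALoop rest

def check_suspicious_patterns_py (fields : List (String × String)) : Bool :=
  if fields.isEmpty then false
  else pvALoop fields

-- ===== PORT B =====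
-- by_first = {}; for ind in indicators: by_first.setdefault(ind[0], []).append(ind)
-- (ind[0] is total here: every literal indicator is nonempty, so headD never uses its default;
--  setdefault-then-append is d[k] = d.get(k, []) + [ind], i.e. Dict.modify)
def pvByFirst : PySem.Dict Char (List String) :=
  pvIndicators.foldl
    (fun d ind => d.modify (ind.toList.headD ' ') [] (fun l => l ++ [ind]))
    PySem.Dict.empty

-- for i in range(len(low)): for ind in by_first.get(low[i], []): if low.startswith(ind, i): return True
-- (low[i] with 0 ≤ i < len is exactly low.getD i ' '; low.startswith(ind, i) with 0 ≤ i ≤ len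
--  is exactly startswith on low.drop i)
def pvScan (low : List Char) : Bool :=
  (List.range low.length).any (fun i =>
    (pvByFirst.getD (low.getD i ' ') []).any
      (fun ind => PySem.Chars.startswith (low.drop i) ind.toList))

def check_suspicious_patterns_py_alt (fields : List (String × String)) : Bool :=
  if fields.isEmpty then false
  else fields.any (fun kv => kv.2 ≠ "" && pvScan (PySem.Str.lower kv.2).toList)

-- ===== PRECONDITION & SPEC =====
def Spec_check_suspicious_patterns_py (fields : List (String × String)) (out : Bool) : Prop := out = check_suspicious_patterns_py_alt fields
instance (fields : List (String × String)) (out : Bool) : Decidable (Spec_check_suspicious_patterns_py fields out) := by unfold Spec_check_suspicious_patterns_py; infer_instance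

-- ===== CLAIM (what is proved, stated in full; the proofs are below) =====
def Claim_equal_check_suspicious_patterns_py : Prop := ∀ (fields : List (String × String)), Dom_check_suspicious_patterns_py fields → Spec_check_suspicious_patterns_py fields (check_suspicious_patterns_py fields)

-- ===== LEMMAS AND PROOFS =====

-- every indicator is nonempty
theorem pv_ind_ne : ∀ ind ∈ pvIndicators, ind.toList ≠ [] := by decide

-- the bucket of c holds exactly the indicators whose first character is c, in order
theorem pv_bucket (c : Char) :
    pvByFirst.getD c [] = pvIndicators.filter (fun ind => ind.toList.headD ' ' == c) := by
  have h := PySem.Dict.getD_foldl_modify_append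
    (l := pvIndicators.map (fun ind => (ind.toList.headD ' ', ind)))
    (d := PySem.Dict.empty) (c := c)
  rw [List.foldl_map] at h
  simp only [PySem.Dict.getD_empty, List.nil_append, List.filter_map, List.map_map] at h
  unfold pvByFirst
  rw [h]
  simp [Function.comp_def]

-- membership in a bucket
theorem pv_mem_bucket (c : Char) (ind : String) :
    ind ∈ pvByFirst.getD c [] ↔ ind ∈ pvIndicators ∧ ind.toList.headD ' ' = c := by
  rw [pv_bucket, List.mem_filter]
  simp

-- the scanner finds exactly the indicators occurring as substrings
theorem pv_scan_eq (low : List Char) :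
    pvScan low = pvIndicators.any (fun ind => PySem.Chars.isIn ind.toList low) := by
  apply Bool.eq_iff_iff.mpr
  unfold pvScan
  simp only [List.any_eq_true, List.mem_range]
  constructor
  · rintro ⟨i, hi, ind, hmem, hsw⟩
    obtain ⟨hind, -⟩ := (pv_mem_bucket _ ind).mp hmem
    refine ⟨ind, hind, ?_⟩
    rw [← PySem.Chars.exists_prefix_drop_iff_isIn]
    exact ⟨i, (PySem.Chars.startswith_iff _ _).mp hsw⟩
  · rintro ⟨ind, hind, hin⟩
    obtain ⟨j, hpre⟩ := (PySem.Chars.exists_prefix_drop_iff_isIn _ _).mpr hin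
    have hne := pv_ind_ne ind hind
    -- j < low.length: otherwise low.drop j = [] and a nonempty list cannot be its prefix
    have hj : j < low.length := by
      by_contra hge
      rw [List.drop_eq_nil_of_le (by omega)] at hpre
      exact hne (List.prefix_nil.mp hpre)
    refine ⟨j, hj, ind, ?_, (PySem.Chars.startswith_iff _ _).mpr hpre⟩
    rw [pv_mem_bucket]
    refine ⟨hind, ?_⟩
    -- the first character of ind equals low[j], since ind is a nonempty prefix of low.drop j
    obtain ⟨a, as, ha⟩ := List.exists_cons_of_ne_nil hne
    obtain ⟨t, ht⟩ := hpre
    have hdj : low.drop j = a :: (as ++ t) := by rw [← ht, ha]; simp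
    have hgd : low.getD j ' ' = a := by
      rw [List.getD_eq_getElem?_getD, ← List.head?_drop, hdj]
      rfl
    rw [ha, hgd]
    rfl

-- A's loop is the any-fold over the pairs
theorem pvALoop_eq_any (fields : List (String × String)) :
    pvALoop fields = fields.any (fun kv =>
      kv.2 ≠ "" && pvIndicators.any (fun ind => PySem.Str.isIn ind (PySem.Str.lower kv.2))) := by
  induction fields with
  | nil => rfl
  | cons kv rest ih =>
    obtain ⟨k, v⟩ := kv
    simp only [pvALoop, List.any_cons, ih]
    by_cases hv : v = ""
    · subst hv; simp
    · rw [if_pos hv]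
      cases hany : pvIndicators.any (fun ind => PySem.Str.isIn ind (PySem.Str.lower v)) with
      | false => simp [hv]
      | true => simp [hv]

theorem pv_main (fields : List (String × String)) :
    check_suspicious_patterns_py fields = check_suspicious_patterns_py_alt fields := by
  unfold check_suspicious_patterns_py check_suspicious_patterns_py_alt
  by_cases he : fields.isEmpty
  · simp [he]
  · simp only [if_neg he, pvALoop_eq_any, pv_scan_eq, PySem.Str.isIn_eq]

-- ===== VERDICT (by name: the statement is the Claim_ definition above) =====
theorem check_suspicious_patterns_py_spec : Claim_equal_check_suspicious_patterns_py := by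
  intro fields _
  unfold Spec_check_suspicious_patterns_py
  exact pv_main fields
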